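-- pv_equiv track=rewrite | github.com/7huukdlnkjkjba/PhantomCrawler | src/modules/evasion/fingerprint_spoofer.py | is_captcha_url
-- ===== SOURCE A (Python) =====
-- def is_captcha_url(url: str) -> bool:
--     """根据URL检测是否为验证码页面
--
--     Args:
--         url: 要检测的URL
--
--     Returns:
--         是否为验证码URL
--     """
--     # 验证码URL常见模式
--     captcha_url_patterns = [
--         'captcha', 'verify', 'robot', 'security', 'recaptcha', 'hcaptcha',
--         'distil', 'challenge', 'validation', 'auth', 'login', 'verification',
--         'check', 'human', 'antibot', 'spam', 'robot', 'automated'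
--     ]
--
--     url_lower = url.lower()
--     for pattern in captcha_url_patterns:
--         if pattern in url_lower:
--             return True
--
--     return False
-- ===== SOURCE B (Python) =====
-- # B: builds a trie (prefix tree) of the patterns once at import time, then scans the
-- # lowered URL once, walking the trie from each start position (objective: alternative).
-- _PATTERNS = (
--     'captcha', 'verify', 'robot', 'security', 'recaptcha', 'hcaptcha',
--     'distil', 'challenge', 'validation', 'auth', 'login', 'verification',
--     'check', 'human', 'antibot', 'spam', 'robot', 'automated'
-- )
--
--
-- def _build_trie():
--     root = {}
--     for pat in _PATTERNS:
--         node = root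
--         for ch in pat:
--             node = node.setdefault(ch, {})
--         node[''] = True  # accept marker
--     return root
--
--
-- _TRIE = _build_trie()
--
--
-- def is_captcha_url(url: str) -> bool:
--     u = url.lower()
--     n = len(u)
--     for i in range(n):
--         node = _TRIE
--         for j in range(i, n):
--             node = node.get(u[j])
--             if node is None:
--                 break
--             if '' in node:
--                 return True
--     return False
-- ===== Notes on version B (the rewrite author's own statement) =====
-- stated objective: alternative
-- what changed: Replaces A's per-pattern substring-membership loop by a trie of the patterns built once at import time, walked over the lowered URL from each start position.
import Mathlib
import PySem

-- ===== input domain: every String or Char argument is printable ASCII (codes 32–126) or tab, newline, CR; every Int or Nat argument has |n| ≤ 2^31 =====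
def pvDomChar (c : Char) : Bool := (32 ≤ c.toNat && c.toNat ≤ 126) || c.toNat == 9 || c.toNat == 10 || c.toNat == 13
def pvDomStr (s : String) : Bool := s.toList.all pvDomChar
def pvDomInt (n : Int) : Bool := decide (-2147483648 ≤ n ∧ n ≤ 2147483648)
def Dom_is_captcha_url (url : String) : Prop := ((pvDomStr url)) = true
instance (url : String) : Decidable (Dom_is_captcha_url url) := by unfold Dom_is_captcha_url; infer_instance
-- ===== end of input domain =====

-- B replaces A's per-pattern substring loop by a trie of the patterns, built once
-- and walked over the lowered URL from each start position (objective: alternative).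

-- ===== PORT A =====
-- A's captcha_url_patterns literal (including the duplicated 'robot').
def pvPatternsA : List (List Char) :=
  ["captcha".toList, "verify".toList, "robot".toList, "security".toList,
   "recaptcha".toList, "hcaptcha".toList, "distil".toList, "challenge".toList,
   "validation".toList, "auth".toList, "login".toList, "verification".toList,
   "check".toList, "human".toList, "antibot".toList, "spam".toList,
   "robot".toList, "automated".toList]

-- A's loop: 'for pattern in patterns: if pattern in url_lower: return True' / 'return False'.
def pvLoopA : List (List Char) → List Char → Bool
  | [], _ => false
  | p :: rest, u => if PySem.Chars.isIn p u then true else pvLoopA rest u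

def is_captcha_url (url : String) : Bool :=
  pvLoopA pvPatternsA (PySem.Chars.lower url.toList)

-- ===== PORT B =====
-- Source B's same module-level pattern tuple.
def pvPatternsB : List (List Char) :=
  ["captcha".toList, "verify".toList, "robot".toList, "security".toList,
   "recaptcha".toList, "hcaptcha".toList, "distil".toList, "challenge".toList,
   "validation".toList, "auth".toList, "login".toList, "verification".toList,
   "check".toList, "human".toList, "antibot".toList, "spam".toList,
   "robot".toList, "automated".toList]

-- Source B's trie of nested dicts: a node is an accept flag ('' key) plus a child list
-- (mutual pair instead of a nested inductive, as required).
mutual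
inductive PTrie where
  | node : Bool → PKids → PTrie
  deriving Repr
inductive PKids where
  | nil : PKids
  | cons : Char → PTrie → PKids → PKids
  deriving Repr
end

-- node.get(ch): first child with that character.
def pvLookup (c : Char) : PKids → Option PTrie
  | .nil => none
  | .cons c' t rest => if c' = c then some t else pvLookup c rest

-- _build_trie's inner loop: node.setdefault(ch, {}) walk, then node[''] = True.
mutual
def pvInsert : PTrie → List Char → PTrie
  | .node _ ch, [] => .node true ch
  | .node acc ch, c :: p => .node acc (pvKidInsert ch c p)
  termination_by t p => (p.length, 0, 0)
def pvKidInsert : PKids → Char → List Char → PKids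
  | .nil, c, p => .cons c (pvInsert (.node false .nil) p) .nil
  | .cons c' t rest, c, p =>
      if c' = c then .cons c' (pvInsert t p) rest
      else .cons c' t (pvKidInsert rest c p)
  termination_by ch _ p => (p.length, 1, sizeOf ch)
end

-- _TRIE: the patterns inserted into the empty trie, in order.
def pvTrie : PTrie := pvPatternsB.foldl pvInsert (.node false .nil)

def pvAccept : PTrie → Bool
  | .node acc _ => acc

-- Source B's inner loop: walk the trie along u[i:], stop on a missing child,
-- succeed when an accept marker is reached (checked after consuming a char).
def pvWalk : PTrie → List Char → Bool
  | _, [] => false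
  | .node _ ch, c :: rest =>
      match pvLookup c ch with
      | none => false
      | some t => pvAccept t || pvWalk t rest

-- Source B's outer loop over start positions i.
def pvScanB : List Char → Bool
  | [] => false
  | c :: rest => pvWalk pvTrie (c :: rest) || pvScanB rest

def is_captcha_url_alt (url : String) : Bool :=
  pvScanB (PySem.Chars.lower url.toList)

-- ===== PRECONDITION & SPEC =====
def Spec_is_captcha_url (url : String) (out : Bool) : Prop := out = is_captcha_url_alt url
instance (url : String) (out : Bool) : Decidable (Spec_is_captcha_url url out) := by unfold Spec_is_captcha_url; infer_instance

-- ===== CLAIM (what is proved, stated in full; the proofs are below) =====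
def Claim_equal_is_captcha_url : Prop := ∀ (url : String), Dom_is_captcha_url url → Spec_is_captcha_url url (is_captcha_url url)

-- ===== LEMMAS AND PROOFS =====

-- A's loop is 'some pattern is a substring'.
theorem pvLoopA_eq_any (ps : List (List Char)) (u : List Char) :
    pvLoopA ps u = ps.any (fun p => PySem.Chars.isIn p u) := by
  induction ps with
  | nil => rfl
  | cons p rest ih => by_cases h : PySem.Chars.isIn p u <;> simp [pvLoopA, h, ih]

theorem pvPatterns_ne_nil : ∀ p ∈ pvPatternsB, p ≠ [] := by decide

-- the word p is stored in the trie t (spelled along pvLookup).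
def pvHas : PTrie → List Char → Prop
  | .node acc _, [] => acc = true
  | .node _ ch, c :: p => ∃ t, pvLookup c ch = some t ∧ pvHas t p

theorem pvHas_empty (p : List Char) : ¬ pvHas (.node false .nil) p := by
  cases p <;> simp [pvHas, pvLookup]

theorem pvLookup_kidInsert_ne : ∀ (ch : PKids) (c c₀ : Char) (p : List Char), c ≠ c₀ →
    pvLookup c (pvKidInsert ch c₀ p) = pvLookup c ch
  | .nil, c, c₀, p, h => by
      have h' : ¬ c₀ = c := fun e => h (Eq.symm e)
      simp [pvKidInsert, pvLookup, h']
  | .cons c' t rest, c, c₀, p, h => by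
      by_cases h' : c' = c₀ <;>
        by_cases h'' : c' = c <;>
          simp_all [pvKidInsert, pvLookup, pvLookup_kidInsert_ne rest c c₀ p h]

theorem pvLookup_kidInsert_eq : ∀ (ch : PKids) (c : Char) (p : List Char),
    pvLookup c (pvKidInsert ch c p) =
      some (pvInsert ((pvLookup c ch).getD (.node false .nil)) p)
  | .nil, c, p => by simp [pvKidInsert, pvLookup]
  | .cons c' t rest, c, p => by
      by_cases h : c' = c <;>
        simp [pvKidInsert, pvLookup, h, pvLookup_kidInsert_eq rest c p]

theorem pvHas_insert (p : List Char) : ∀ (t : PTrie) (q : List Char),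
    pvHas (pvInsert t q) p ↔ (p = q ∨ pvHas t p) := by
  induction p with
  | nil =>
      rintro ⟨acc, ch⟩ q
      cases q with
      | nil => simp [pvInsert, pvHas]
      | cons c q' => simp [pvInsert, pvHas]
  | cons c p' ih =>
      rintro ⟨acc, ch⟩ q
      cases q with
      | nil => simp [pvInsert, pvHas]
      | cons c₀ q' =>
          by_cases h : c = c₀
          · subst h
            simp only [pvInsert, pvHas, pvLookup_kidInsert_eq, Option.some.injEq,
              List.cons.injEq, true_and]
            constructor
            · rintro ⟨t, rfl, hhas⟩
              rcases (ih _ _).mp hhas with h' | h'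
              · exact Or.inl h'
              · cases hl : pvLookup c ch with
                | none => rw [hl] at h'; exact absurd h' (pvHas_empty p')
                | some t₀ => rw [hl] at h'; exact Or.inr ⟨t₀, rfl, h'⟩
            · rintro (h' | ⟨t, ht, hhas⟩)
              · exact ⟨_, rfl, (ih _ _).mpr (Or.inl h')⟩
              · refine ⟨_, rfl, (ih _ _).mpr (Or.inr ?_)⟩
                rw [ht]; exact hhas
          · simp only [pvInsert, pvHas, pvLookup_kidInsert_ne ch c c₀ q' h,
              List.cons.injEq]
            constructor
            · rintro ⟨t, ht, hhas⟩; exact Or.inr ⟨t, ht, hhas⟩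
            · rintro (⟨h', -⟩ | h')
              · exact absurd h' h
              · exact h'

theorem pvHas_foldl (ps : List (List Char)) : ∀ (t : PTrie) (p : List Char),
    pvHas (ps.foldl pvInsert t) p ↔ (p ∈ ps ∨ pvHas t p) := by
  induction ps with
  | nil => simp
  | cons q rest ih =>
      intro t p
      simp only [List.foldl_cons, ih, pvHas_insert, List.mem_cons]
      tauto

theorem pvHas_trie (p : List Char) : pvHas pvTrie p ↔ p ∈ pvPatternsB := by
  simp [pvTrie, pvHas_foldl, pvHas_empty p]

theorem pvAccept_iff (t : PTrie) : pvAccept t = true ↔ pvHas t [] := by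
  cases t; simp [pvAccept, pvHas]

-- the trie walk from a position finds exactly the nonempty stored words that are prefixes.
theorem pvWalk_iff (u : List Char) : ∀ t : PTrie,
    pvWalk t u = true ↔ ∃ p, p ≠ [] ∧ pvHas t p ∧ p <+: u := by
  induction u with
  | nil =>
      rintro ⟨acc, ch⟩
      simp only [pvWalk, List.prefix_nil]
      constructor
      · intro h; cases h
      · rintro ⟨p, hne, _, rfl⟩; exact absurd rfl hne
  | cons c rest ih =>
      rintro ⟨acc, ch⟩
      simp only [pvWalk]
      cases hl : pvLookup c ch with
      | none =>
          constructor
          · intro h; cases h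
          · rintro ⟨p, hne, hhas, hpre⟩
            cases p with
            | nil => exact absurd rfl hne
            | cons c' p' =>
                rw [List.cons_prefix_cons] at hpre
                obtain ⟨rfl, -⟩ := hpre
                obtain ⟨t', ht', -⟩ := hhas
                simp [hl] at ht'
      | some t =>
          simp only [Bool.or_eq_true, pvAccept_iff, ih]
          constructor
          · rintro (h | ⟨p', hne, hhas, hpre⟩)
            · exact ⟨[c], by simp, ⟨t, hl, h⟩, by simp⟩
            · exact ⟨c :: p', by simp, ⟨t, hl, hhas⟩, by simpa [List.cons_prefix_cons]⟩
          · rintro ⟨p, hne, hhas, hpre⟩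
            cases p with
            | nil => exact absurd rfl hne
            | cons c' p' =>
                rw [List.cons_prefix_cons] at hpre
                obtain ⟨rfl, hpre⟩ := hpre
                obtain ⟨t', ht', hhas'⟩ := hhas
                rw [hl] at ht'; cases ht'
                cases p' with
                | nil => exact Or.inl hhas'
                | cons d p'' => exact Or.inr ⟨d :: p'', by simp, hhas', hpre⟩

theorem pvScanB_iff (u : List Char) :
    pvScanB u = true ↔ ∃ p ∈ pvPatternsB, ∃ j, p <+: u.drop j := by
  induction u with
  | nil =>
      simp only [pvScanB, List.drop_nil]
      constructor
      · intro h; cases h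
      · rintro ⟨p, hp, _, hpre⟩
        exact absurd (List.prefix_nil.mp hpre) (pvPatterns_ne_nil p hp)
  | cons c rest ih =>
      simp only [pvScanB, Bool.or_eq_true, ih, pvWalk_iff]
      constructor
      · rintro (⟨p, _, hhas, hpre⟩ | ⟨p, hp, j, hpre⟩)
        · exact ⟨p, (pvHas_trie p).mp hhas, 0, by simpa using hpre⟩
        · exact ⟨p, hp, j + 1, by simpa using hpre⟩
      · rintro ⟨p, hp, j, hpre⟩
        cases j with
        | zero =>
            exact Or.inl ⟨p, pvPatterns_ne_nil p hp, (pvHas_trie p).mpr hp,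
              by simpa using hpre⟩
        | succ j => exact Or.inr ⟨p, hp, j, by simpa using hpre⟩

theorem pv_main (u : List Char) : pvLoopA pvPatternsA u = pvScanB u := by
  rw [Bool.eq_iff_iff, pvLoopA_eq_any, pvScanB_iff]
  simp only [List.any_eq_true]
  constructor
  · rintro ⟨p, hp, hin⟩
    exact ⟨p, hp, (PySem.Chars.exists_prefix_drop_iff_isIn p u).mpr hin⟩
  · rintro ⟨p, hp, hj⟩
    exact ⟨p, hp, (PySem.Chars.exists_prefix_drop_iff_isIn p u).mp hj⟩

-- ===== VERDICT (by name: the statement is the Claim_ definition above) =====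
theorem is_captcha_url_spec : Claim_equal_is_captcha_url := by
  intro url _
  unfold Spec_is_captcha_url is_captcha_url is_captcha_url_alt
  exact pv_main _
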